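-- pv_equiv track=rewrite | github.com/bryanpze/Five-Card-Draw-CFR | article_bot.py | check_royal_cat_hop
-- ===== SOURCE A (Python) =====
-- from itertools import combinations
--
-- def check_royal_cat_hop(current_player_hand):
--     for potential_hand in combinations(["ad","kd","td","qd","jd"],3):
--         if set(potential_hand).issubset(current_player_hand):
--             return True
--     for potential_hand in combinations(["as","ks","ts","qs","js"],3):
--         if set(potential_hand).issubset(current_player_hand):
--             return True
--     for potential_hand in combinations(["as","ks","ts","qs","js"],3):
--         if set(potential_hand).issubset(current_player_hand):
--             return True
--     for potential_hand in combinations(["as","ks","ts","qs","js"],3):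
--         if set(potential_hand).issubset(current_player_hand):
--             return True
-- ===== SOURCE B (Python) =====
-- def check_royal_cat_hop(current_player_hand):
--     for targets in (["ad", "kd", "td", "qd", "jd"], ["as", "ks", "ts", "qs", "js"]):
--         if sum(c in current_player_hand for c in targets) >= 3:
--             return True
-- ===== Notes on version B (the rewrite author's own statement) =====
-- stated objective: faster
-- what changed: Instead of enumerating all 3-card combinations of each royal suit and testing set-subset inclusion for each (with the spade loop duplicated three times, 40 subset tests worst case), B counts per suit how many of the five target cards are in the hand with a single membership sum and returns True if either count reaches 3, falling off the end (None) otherwise.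
import Mathlib
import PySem

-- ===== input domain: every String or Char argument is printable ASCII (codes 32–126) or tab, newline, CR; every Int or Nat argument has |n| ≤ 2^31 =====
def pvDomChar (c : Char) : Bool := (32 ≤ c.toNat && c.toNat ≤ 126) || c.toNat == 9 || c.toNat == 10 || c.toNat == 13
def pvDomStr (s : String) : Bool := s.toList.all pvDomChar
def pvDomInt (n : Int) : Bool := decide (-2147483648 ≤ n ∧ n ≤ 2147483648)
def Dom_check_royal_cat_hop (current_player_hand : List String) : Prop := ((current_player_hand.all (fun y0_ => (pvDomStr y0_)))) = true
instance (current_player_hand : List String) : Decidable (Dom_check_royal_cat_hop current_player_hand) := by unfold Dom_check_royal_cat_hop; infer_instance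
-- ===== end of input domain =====

-- B replaces A's enumeration of 3-card combinations (and triplicated spade loop) by a per-suit
-- membership count (>= 3 of either royal suit), returning none when nothing matches, as A does.

-- ===== PORT A =====
-- combinations(xs, 2) and (xs, 3) in itertools order
def pyCombos2 (xs : List String) : List (List String) :=
  match xs with
  | [] => []
  | x :: rest => (rest.map (fun y => [x, y])) ++ pyCombos2 rest

def pyCombos3 (xs : List String) : List (List String) :=
  match xs with
  | [] => []
  | x :: rest => ((pyCombos2 rest).map (fun t => x :: t)) ++ pyCombos3 rest

-- first for-loop of A: scan the triples, return True on the first subset hit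
def aLoop (triples : List (List String)) (hand : List String) : Option Bool :=
  match triples with
  | [] => none
  | t :: rest => if t.all (fun c => hand.contains c) then some true else aLoop rest hand

def check_royal_cat_hop (current_player_hand : List String) : Option Bool :=
  match aLoop (pyCombos3 ["ad", "kd", "td", "qd", "jd"]) current_player_hand with
  | some b => some b
  | none =>
    match aLoop (pyCombos3 ["as", "ks", "ts", "qs", "js"]) current_player_hand with
    | some b => some b
    | none =>
      match aLoop (pyCombos3 ["as", "ks", "ts", "qs", "js"]) current_player_hand with
      | some b => some b
      | none =>
        match aLoop (pyCombos3 ["as", "ks", "ts", "qs", "js"]) current_player_hand with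
        | some b => some b
        | none => none

-- ===== PORT B =====
-- B: per-suit membership count; falls off the end (none) like the Python
def altLoop (suits : List (List String)) (hand : List String) : Option Bool :=
  match suits with
  | [] => none
  | targets :: rest =>
    if 3 ≤ (targets.map (fun c => if hand.contains c then (1 : Int) else 0)).sum
    then some true else altLoop rest hand

def check_royal_cat_hop_alt (current_player_hand : List String) : Option Bool :=
  altLoop [["ad", "kd", "td", "qd", "jd"], ["as", "ks", "ts", "qs", "js"]] current_player_hand

-- ===== PRECONDITION & SPEC =====
def Spec_check_royal_cat_hop (current_player_hand : List String) (out : Option Bool) : Prop := out = check_royal_cat_hop_alt current_player_hand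
instance (current_player_hand : List String) (out : Option Bool) : Decidable (Spec_check_royal_cat_hop current_player_hand out) := by unfold Spec_check_royal_cat_hop; infer_instance

-- ===== CLAIM (what is proved, stated in full; the proofs are below) =====
def Claim_equal_check_royal_cat_hop : Prop := ∀ (current_player_hand : List String), Dom_check_royal_cat_hop current_player_hand → Spec_check_royal_cat_hop current_player_hand (check_royal_cat_hop current_player_hand)

-- ===== LEMMAS AND PROOFS =====

-- ===== VERDICT (by name: the statement is the Claim_ definition above) =====
set_option maxHeartbeats 2000000 in
theorem check_royal_cat_hop_spec : Claim_equal_check_royal_cat_hop := by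
  intro hand _
  unfold Spec_check_royal_cat_hop
  simp only [check_royal_cat_hop, check_royal_cat_hop_alt, pyCombos3, pyCombos2,
    aLoop, altLoop, List.map_cons, List.map_nil, List.cons_append, List.nil_append,
    List.all_cons, List.all_nil, List.sum_cons, List.sum_nil]
  generalize hand.contains "ad" = a1
  generalize hand.contains "kd" = a2
  generalize hand.contains "td" = a3
  generalize hand.contains "qd" = a4
  generalize hand.contains "jd" = a5
  generalize hand.contains "as" = b1
  generalize hand.contains "ks" = b2
  generalize hand.contains "ts" = b3
  generalize hand.contains "qs" = b4
  generalize hand.contains "js" = b5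
  cases a1 <;> cases a2 <;> cases a3 <;> cases a4 <;> cases a5 <;>
  cases b1 <;> cases b2 <;> cases b3 <;> cases b4 <;> cases b5 <;> decide
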